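-- pv_equiv track=rewrite | github.com/yihanc/LC | LINTCODE/179_update_bits.py | updateBits
-- ===== SOURCE A (Python) =====
-- def updateBits(n, m, i, j):
--     # write your code here
--     # Idea is to mask n[i:j] into 0 and or m
--     # N:    0000 0000 0000 0000 0000 0010 0010 0000
--     # Mask: 1111 1111 1111 1111 1111 1111 1000 0011
--     # Idea is: N & mask | (m << i)
--     #
--     def _toTwoComplement(bits, value):
--         return ((1 << bits) - 1) & value
--
--     n_two = _toTwoComplement(32, n)
--
--     ones = int("1" * 32, 2)
--     mask_bits = ""
--     idx = 0
--     while idx <= 31: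
--         if idx >= i and idx <= j:
--             mask_bits = "0" + mask_bits
--         else:
--             mask_bits = "1" + mask_bits
--         idx += 1
--
--     mask = int(mask_bits, 2)
--     ans = n_two & mask | (m << i)
--
--     return - ((ans ^ ones) + 1) if ans > (2 ** 31 - 1) else ans
-- ===== SOURCE B (Python) =====
-- def updateBits(n, m, i, j):
--     # Closed-form clear-mask instead of A's 32-step string build + int(...,2) parse.
--     lo = max(i, 0)
--     hi = min(j, 31)
--     mask = 0xFFFFFFFF
--     if lo <= hi:
--         mask ^= ((1 << (hi - lo + 1)) - 1) << lo
--     ans = (n & 0xFFFFFFFF) & mask | (m << i)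
--     return -((ans ^ 0xFFFFFFFF) + 1) if ans > 0x7FFFFFFF else ans
-- ===== Notes on version B (the rewrite author's own statement) =====
-- stated objective: simpler
-- what changed: B computes the 32-bit clear-mask in closed form (clamp [i,j] to [0,31], then XOR a shifted block of ones out of 0xFFFFFFFF) instead of A's 32-iteration loop that builds a '0'/'1' string and re-parses it with int(...,2); the masking, or-in of m<<i and signed-32-bit conversion are unchanged.
import Mathlib
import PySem

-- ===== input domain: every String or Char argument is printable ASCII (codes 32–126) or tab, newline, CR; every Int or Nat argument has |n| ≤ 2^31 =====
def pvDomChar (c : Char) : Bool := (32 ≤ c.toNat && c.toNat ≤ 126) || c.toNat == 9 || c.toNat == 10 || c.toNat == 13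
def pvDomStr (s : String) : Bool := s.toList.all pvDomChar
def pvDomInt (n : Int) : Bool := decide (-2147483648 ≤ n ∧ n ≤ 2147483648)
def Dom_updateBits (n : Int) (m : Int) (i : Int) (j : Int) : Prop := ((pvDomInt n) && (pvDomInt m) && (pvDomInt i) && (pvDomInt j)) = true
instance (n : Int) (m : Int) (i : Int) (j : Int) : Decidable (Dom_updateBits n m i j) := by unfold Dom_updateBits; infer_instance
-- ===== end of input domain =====

-- B replaces A's 32-iteration mask-string build + int(...,2) parse with a closed-form mask; objective: simpler.

-- ===== PORT A =====
-- exact model of Python's int(s, 2) on strings made only of '0'/'1' characters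
-- (the only strings A passes to it)
def pvBinParse (s : List Char) : Int :=
  s.foldl (fun acc c => 2 * acc + (if c = '1' then 1 else 0)) 0

def updateBits (n : Int) (m : Int) (i : Int) (j : Int) : Int :=
  let n_two := PySem.Int.band (((1 : Int) <<< (32 : Nat)) - 1) n   -- _toTwoComplement(32, n)
  let ones := pvBinParse (List.replicate 32 '1')                   -- int("1"*32, 2)
  -- while idx <= 31: prepend '0' if i ≤ idx ≤ j else '1'
  let mask_bits := (PySem.List.pyRange 0 32 1).foldl
    (fun mb idx => if idx ≥ i ∧ idx ≤ j then '0' :: mb else '1' :: mb) []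
  let mask := pvBinParse mask_bits
  -- m << i: exact for 0 ≤ i (Pre_); Python raises ValueError for i < 0
  let ans := PySem.Int.bor (PySem.Int.band n_two mask) (m <<< i.toNat)
  if ans > 2 ^ 31 - 1 then -(PySem.Int.bxor ans ones + 1) else ans

-- ===== PORT B =====
def updateBits_alt (n : Int) (m : Int) (i : Int) (j : Int) : Int :=
  let lo := max i 0
  let hi := min j 31
  let mask := if lo ≤ hi
    then PySem.Int.bxor 0xFFFFFFFF ((((1 : Int) <<< (hi - lo + 1).toNat) - 1) <<< lo.toNat)
    else (0xFFFFFFFF : Int)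
  -- m << i: exact for 0 ≤ i (Pre_); Python raises ValueError for i < 0
  let ans := PySem.Int.bor (PySem.Int.band (PySem.Int.band n 0xFFFFFFFF) mask) (m <<< i.toNat)
  if ans > 0x7FFFFFFF then -(PySem.Int.bxor ans 0xFFFFFFFF + 1) else ans

-- ===== PRECONDITION & SPEC =====
-- Pre_ excludes i < 0, where both Pythons raise ValueError ('negative shift count' in m << i).
def Pre_updateBits (n : Int) (m : Int) (i : Int) (j : Int) : Prop := 0 ≤ i
instance (n : Int) (m : Int) (i : Int) (j : Int) : Decidable (Pre_updateBits n m i j) := by unfold Pre_updateBits; infer_instance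
def pvWitness_updateBits : Int × Int × Int × Int := (1, 2, 2, 5)

def Spec_updateBits (n : Int) (m : Int) (i : Int) (j : Int) (out : Int) : Prop := out = updateBits_alt n m i j
instance (n : Int) (m : Int) (i : Int) (j : Int) (out : Int) : Decidable (Spec_updateBits n m i j out) := by unfold Spec_updateBits; infer_instance

-- ===== CLAIM (what is proved, stated in full; the proofs are below) =====
def Claim_equal_updateBits : Prop := ∀ (n : Int) (m : Int) (i : Int) (j : Int), Dom_updateBits n m i j → Pre_updateBits n m i j → Spec_updateBits n m i j (updateBits n m i j)

-- ===== LEMMAS AND PROOFS =====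

-- A's mask value (the string build + parse), as a standalone function of i, j
def maskA (i j : Int) : Int :=
  pvBinParse ((PySem.List.pyRange 0 32 1).foldl
    (fun mb idx => if idx ≥ i ∧ idx ≤ j then '0' :: mb else '1' :: mb) [])

-- B's closed-form mask, as a standalone function of i, j
def maskB (i j : Int) : Int :=
  if max i 0 ≤ min j 31
    then PySem.Int.bxor 0xFFFFFFFF ((((1 : Int) <<< (min j 31 - max i 0 + 1).toNat) - 1) <<< (max i 0).toNat)
    else (0xFFFFFFFF : Int)

-- the shared tail of both programs
def pvCore (n m i mask : Int) : Int :=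
  let ans := PySem.Int.bor (PySem.Int.band (PySem.Int.band n 0xFFFFFFFF) mask) (m <<< i.toNat)
  if ans > 0x7FFFFFFF then -(PySem.Int.bxor ans 0xFFFFFFFF + 1) else ans

lemma updateBits_eq_core (n m i j : Int) :
    updateBits n m i j = pvCore n m i (maskA i j) := by
  have hones : pvBinParse (List.replicate 32 '1') = (0xFFFFFFFF : Int) := by decide
  have hshift : ((1 : Int) <<< (32 : Nat)) - 1 = (0xFFFFFFFF : Int) := by decide
  have hpow : (2 : Int) ^ 31 - 1 = (0x7FFFFFFF : Int) := by decide
  unfold updateBits pvCore maskA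
  rw [hones, hshift, hpow, PySem.Int.band_comm (0xFFFFFFFF : Int) n]

lemma updateBits_alt_eq_core (n m i j : Int) :
    updateBits_alt n m i j = pvCore n m i (maskB i j) := rfl

lemma maskA_clamp (i j : Int) :
    maskA i j = maskA (min i 32) (max (min j 31) (-1)) := by
  unfold maskA
  congr 1
  refine PySem.List.foldl_congr_mem _ _ _ _ (fun mb idx hmem => ?_)
  have hr := PySem.List.mem_pyRange_one.mp hmem
  by_cases hc : idx ≥ i ∧ idx ≤ j
  · rw [if_pos hc, if_pos ⟨by omega, by omega⟩]
  · rw [if_neg hc, if_neg (by omega)]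

lemma maskB_clamp (i j : Int) (h : 0 ≤ i) :
    maskB i j = maskB (min i 32) (max (min j 31) (-1)) := by
  unfold maskB
  by_cases hc : max i 0 ≤ min j 31
  · rw [if_pos hc, if_pos (by omega)]
    have h1 : max (min i 32) 0 = max i 0 := by omega
    have h2 : min (max (min j 31) (-1)) 31 = min j 31 := by omega
    rw [h1, h2]
  · rw [if_neg hc, if_neg (by omega)]

set_option maxRecDepth 4000 in
set_option maxHeartbeats 2000000 in
lemma mask_small : ∀ (a : Fin 33) (b : Fin 34),
    maskA (a : Int) ((b : Int) - 1) = maskB (a : Int) ((b : Int) - 1) := by decide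

lemma mask_eq (i j : Int) (h : 0 ≤ i) : maskA i j = maskB i j := by
  have ha : (0 : Int) ≤ min i 32 := by omega
  set i' := min i 32 with hi'
  set j' := max (min j 31) (-1) with hj'
  have hib : i'.toNat < 33 := by omega
  have hjb : (j' + 1).toNat < 34 := by omega
  have hia : ((⟨i'.toNat, hib⟩ : Fin 33) : Int) = i' := by simp; omega
  have hja : ((⟨(j' + 1).toNat, hjb⟩ : Fin 34) : Int) - 1 = j' := by simp; omega
  calc maskA i j = maskA i' j' := maskA_clamp i j
    _ = maskB i' j' := by
        rw [← hia, ← hja]; exact mask_small _ _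
    _ = maskB i j := (maskB_clamp i j h).symm

-- ===== VERDICT (by name: the statement is the Claim_ definition above) =====
theorem updateBits_spec : Claim_equal_updateBits := by
  intro n m i j _ hpre
  unfold Spec_updateBits
  rw [updateBits_eq_core, updateBits_alt_eq_core, mask_eq i j hpre]
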